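-- pv_equiv track=rewrite | github.com/kspra3/FIT3155-Advanced-Algorithms-and-Data-Structures | FIT3155Sol/Ass1Sol/q2/wildcard_matching.py | good_prefix
-- ===== SOURCE A (Python) =====
-- def zAlgo(string):
--     # Implementing Z-algorithm.
--     # Part of this code was obtained from geeksforgeeks.com
--     m = len(string)
--     # Initializing the array.
--     z = [None] * m
--     # [L,R] make a window which matches z box.
--     L = R = j = 0
--
--     for i in range(1, m):
--         # These are cases where there is no match.
--         # Naive method used to calculate array.
--         if i > R:
--             L = R = i
--             # Traversing from index 0.
--             while R < m and string[R - L] == string[R]: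
--                 R += 1
--             z[i] = R - L
--             R -= 1
--         else:
--             # Obtaining number of matches in the z box.
--             j = i - L
--             if z[j] < R - i + 1:
--                 z[i] = z[j]
--             else:
--                 # Start from R and check manually.
--                 L = i
--                 while R < m and string[R - L] == string[R]:
--                     R += 1
--                 z[i] = R - L
--                 R -= 1
--     return z
--
-- def good_prefix(string):
--     # Gusfield's implementation.
--     # We make it better using Galil's optimisation.
--     # Part of this code was obtained from geeksforgeeks.com
--     # Creating an array of zeros.
--     good_prefix = [-1] * (len(string) + 1)
--     # Pre-processing string.
--     # Reversing.
--     string = string[::-1]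
--     # Obtaining Z Array.
--     z_array = zAlgo(string)
--     # Reversing Z Arry
--     z_array2 = z_array[::-1]
--
--     for i in range(len(string)-1):
--         j = len(string) - z_array2[i]
--         good_prefix[j] = i
--
--     return good_prefix
-- ===== SOURCE B (Python) =====
-- def good_prefix(string):
--     # Same good-prefix table, but the Z-values are computed by the naive
--     # windowless method (fresh scan per index) and written into the table
--     # by a single reverse-indexed loop (no array reversals).
--     gp = [-1] * (len(string) + 1)
--     rev = string[::-1]
--     m = len(rev)
--     z = [0] * m
--     for i in range(1, m):
--         k = 0
--         while i + k < m and rev[k] == rev[i + k]: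
--             k += 1
--         z[i] = k
--     for t in range(m - 1, 0, -1):
--         gp[m - z[t]] = m - 1 - t
--     return gp
-- ===== Notes on version B (the rewrite author's own statement) =====
-- stated objective: simpler
-- what changed: The Z-array is computed by the naive windowless method (a fresh character-by-character scan per index, no L/R z-box and no amortised reuse), and the good-prefix fill loop runs over the reversed index range directly so both array reversals (of z and of the range) disappear.
import Mathlib
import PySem

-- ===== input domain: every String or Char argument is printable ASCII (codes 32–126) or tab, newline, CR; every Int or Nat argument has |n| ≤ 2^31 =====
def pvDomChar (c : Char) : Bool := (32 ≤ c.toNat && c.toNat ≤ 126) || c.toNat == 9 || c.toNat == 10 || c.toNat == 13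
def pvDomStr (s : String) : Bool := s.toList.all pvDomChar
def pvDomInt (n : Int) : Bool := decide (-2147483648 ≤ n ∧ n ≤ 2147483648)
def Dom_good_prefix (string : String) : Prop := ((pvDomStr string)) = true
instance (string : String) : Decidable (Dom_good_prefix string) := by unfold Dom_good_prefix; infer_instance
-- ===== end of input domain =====

-- B computes the same good-prefix table with a naive windowless Z-scan and a reverse-indexed
-- fill loop (no array reversals); objective: simpler (no claim of speed).

-- ===== PORT A =====
-- 'while R < m and string[R-L] == string[R]: R += 1' — returns the final R.
-- All indices read are in range on every reachable call; getD's default is never returned.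
def zwhileA (s : List Char) (L R : Nat) : Nat :=
  if h : R < s.length ∧ s.getD (R - L) ' ' = s.getD R ' ' then zwhileA s L (R + 1) else R
termination_by s.length - R
decreasing_by omega

-- one iteration of zAlgo's for-loop; state (z, L, R).  Python's z starts as [None]*m;
-- index 0 is never read before being compared, so the port carries 0 as the placeholder.
def zstepA (s : List Char) (st : List Int × Nat × Nat) (i : Nat) : List Int × Nat × Nat :=
  let z := st.1
  let L := st.2.1
  let R := st.2.2
  if R < i then          -- Python: if i > R
    let R' := zwhileA s i i            -- L = R = i, then the while loop
    (z.set i ((R' : Int) - (i : Int)), i, R' - 1)   -- z[i] = R - L; R -= 1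
  else
    let j := i - L
    if z.getD j 0 < (R : Int) - (i : Int) + 1 then  -- if z[j] < R - i + 1
      (z.set i (z.getD j 0), L, R)                  -- z[i] = z[j]
    else
      let R' := zwhileA s i R                       -- L = i, then the while loop
      (z.set i ((R' : Int) - (i : Int)), i, R' - 1) -- z[i] = R - L; R -= 1

def zAlgoA (s : List Char) : List Int :=
  ((List.range' 1 (s.length - 1)).foldl (zstepA s) (List.replicate s.length 0, 0, 0)).1

def good_prefix (string : String) : List Int :=
  let gp := List.replicate (string.toList.length + 1) (-1 : Int)  -- [-1] * (len(string)+1)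
  let s := string.toList.reverse                                  -- string = string[::-1]
  let z := zAlgoA s
  let z2 := z.reverse
  -- for i in range(len(string)-1): j = len(string) - z_array2[i]; good_prefix[j] = i
  -- j is always in [1, m], hence non-negative: .toNat is exact.
  (List.range (s.length - 1)).foldl
    (fun g i => g.set ((s.length : Int) - z2.getD i 0).toNat (i : Int)) gp

-- ===== PORT B =====
-- 'k = 0; while i + k < m and rev[k] == rev[i+k]: k += 1' — returns the final k.
def bwhileB (s : List Char) (i k : Nat) : Nat :=
  if h : i + k < s.length ∧ s.getD k ' ' = s.getD (i + k) ' ' then bwhileB s i (k + 1) else k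
termination_by s.length - k
decreasing_by omega

def good_prefix_alt (string : String) : List Int :=
  let gp := List.replicate (string.toList.length + 1) (-1 : Int)
  let rev := string.toList.reverse
  let m := rev.length
  -- naive Z: for i in range(1, m): z[i] = (scan length)
  let z := (List.range' 1 (m - 1)).foldl
    (fun z i => z.set i ((bwhileB rev i 0 : Int))) (List.replicate m (0 : Int))
  -- for t in range(m-1, 0, -1): gp[m - z[t]] = m - 1 - t
  ((List.range' 1 (m - 1)).reverse).foldl
    (fun g t => g.set ((m : Int) - z.getD t 0).toNat ((m : Int) - 1 - (t : Int))) gp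

-- ===== PRECONDITION & SPEC =====
def Spec_good_prefix (string : String) (out : List Int) : Prop := out = good_prefix_alt string
instance (string : String) (out : List Int) : Decidable (Spec_good_prefix string out) := by unfold Spec_good_prefix; infer_instance

-- ===== CLAIM (what is proved, stated in full; the proofs are below) =====
def Claim_equal_good_prefix : Prop := ∀ (string : String), Dom_good_prefix string → Spec_good_prefix string (good_prefix string)

-- ===== LEMMAS AND PROOFS =====

-- length of the common extension comparing s[a+t] with s[b+t]
def ext (s : List Char) (a b : Nat) : Nat :=
  if h : b < s.length ∧ s.getD a ' ' = s.getD b ' ' then ext s (a + 1) (b + 1) + 1 else 0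
termination_by s.length - b
decreasing_by omega

theorem ext_matches (s : List Char) (a b : Nat) :
    ∀ t < ext s a b, b + t < s.length ∧ s.getD (a + t) ' ' = s.getD (b + t) ' ' := by
  fun_induction ext s a b with
  | case1 a b h ih =>
    intro t ht
    cases t with
    | zero => simpa using h
    | succ t =>
      have := ih t (by omega)
      constructor
      · omega
      · have h2 := this.2
        simpa [Nat.add_assoc, Nat.add_comm 1 t] using h2
  | case2 a b h => intro t ht; omega

theorem ext_stop (s : List Char) (a b : Nat) :
    ¬ (b + ext s a b < s.length ∧
        s.getD (a + ext s a b) ' ' = s.getD (b + ext s a b) ' ') := by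
  fun_induction ext s a b with
  | case1 a b h ih =>
    intro hc
    apply ih
    constructor
    · omega
    · have h2 := hc.2
      simpa [Nat.add_assoc, Nat.add_comm 1 _] using h2
  | case2 a b h =>
    intro hc
    exact h (by simpa using hc)

theorem ext_le (s : List Char) (a b : Nat) : ext s a b ≤ s.length - b := by
  fun_induction ext s a b with
  | case1 a b h ih => omega
  | case2 a b h => omega

theorem ext_add (s : List Char) (d : Nat) : ∀ a b,
    (∀ t < d, b + t < s.length ∧ s.getD (a + t) ' ' = s.getD (b + t) ' ') →
    ext s a b = d + ext s (a + d) (b + d) := by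
  induction d with
  | zero => intro a b _; simp
  | succ d ih =>
    intro a b h
    have h0 := h 0 (by omega)
    rw [ext]
    rw [dif_pos (by simpa using h0)]
    have hih := ih (a + 1) (b + 1) (by
      intro t ht
      have := h (t + 1) (by omega)
      constructor
      · omega
      · have h2 := this.2
        simpa [Nat.add_assoc, Nat.add_comm 1 t] using h2)
    rw [show a + 1 + d = a + (d + 1) from by omega,
        show b + 1 + d = b + (d + 1) from by omega] at hih
    omega

theorem ext_eq_of (s : List Char) (a b k : Nat)
    (hm : ∀ t < k, b + t < s.length ∧ s.getD (a + t) ' ' = s.getD (b + t) ' ')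
    (hs : ¬ (b + k < s.length ∧ s.getD (a + k) ' ' = s.getD (b + k) ' ')) :
    ext s a b = k := by
  have h1 := ext_add s k a b hm
  have h2 : ext s (a + k) (b + k) = 0 := by
    rw [ext, dif_neg hs]
  omega

theorem zwhileA_eq (s : List Char) (L R : Nat) (hLR : L ≤ R) :
    zwhileA s L R = R + ext s (R - L) R := by
  revert hLR
  fun_induction zwhileA s L R with
  | case1 R hcond ih =>
    intro hLR
    have hih := ih (by omega)
    rw [ext, dif_pos hcond]
    rw [show R + 1 - L = R - L + 1 from by omega] at hih
    omega
  | case2 R hcond =>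
    intro hLR
    rw [ext, dif_neg hcond]
    omega

theorem bwhileB_eq (s : List Char) (i : Nat) : ∀ k, bwhileB s i k = k + ext s k (i + k) := by
  intro k
  fun_induction bwhileB s i k with
  | case1 k hcond ih =>
    rw [ext, dif_pos hcond]
    rw [show i + (k + 1) = i + k + 1 from by omega] at ih
    omega
  | case2 k hcond =>
    rw [ext, dif_neg hcond]
    omega

-- partially filled z array: entries 1 ≤ t < i hold ext s 0 t, others the 0 placeholder
def zpart (s : List Char) (i : Nat) : List Int :=
  (List.range s.length).map (fun t => if 1 ≤ t ∧ t < i then (ext s 0 t : Int) else 0)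

theorem zpart_length (s : List Char) (i : Nat) : (zpart s i).length = s.length := by
  simp [zpart]

theorem zpart_getD (s : List Char) (i t : Nat) (ht : t < s.length) :
    (zpart s i).getD t 0 = if 1 ≤ t ∧ t < i then (ext s 0 t : Int) else 0 := by
  rw [List.getD_eq_getElem?_getD]
  simp [zpart, ht]

theorem zpart_set (s : List Char) (i : Nat) (hi : 1 ≤ i) (_him : i < s.length) :
    (zpart s i).set i ((ext s 0 i : Nat) : Int) = zpart s (i + 1) := by
  apply List.ext_getElem
  · simp [zpart]
  · intro n h1 h2
    have hn : n < s.length := by simpa [zpart] using h2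
    simp only [zpart, List.getElem_set, List.getElem_map, List.getElem_range]
    by_cases hni : i = n
    · subst hni; simp [hi]
    · simp only [if_neg hni]
      by_cases hc : 1 ≤ n ∧ n < i
      · rw [if_pos hc, if_pos (show 1 ≤ n ∧ n < i + 1 from ⟨hc.1, by omega⟩)]
      · rw [if_neg hc,
          if_neg (show ¬(1 ≤ n ∧ n < i + 1) from by intro hc2; exact hc ⟨hc2.1, by omega⟩)]

def InvA (s : List Char) (i : Nat) (st : List Int × Nat × Nat) : Prop :=
  st.1 = zpart s i ∧
  (i ≤ st.2.2 → 1 ≤ st.2.1 ∧ st.2.1 < i ∧ st.2.2 < s.length ∧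
    st.2.2 - st.2.1 + 1 ≤ ext s 0 st.2.1)

theorem stepA (s : List Char) (i : Nat) (st : List Int × Nat × Nat)
    (h1 : 1 ≤ i) (h2 : i < s.length) (h : InvA s i st) :
    InvA s (i + 1) (zstepA s st i) := by
  obtain ⟨z, L, R⟩ := st
  obtain ⟨hz, hbox⟩ := h
  dsimp only at hz hbox
  unfold zstepA
  dsimp only
  by_cases hRi : R < i
  · -- if-branch
    rw [if_pos hRi]
    simp only [InvA]
    have hw : zwhileA s i i = i + ext s 0 i := by
      have := zwhileA_eq s i i (le_refl i)
      simpa using this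
    have hle : ext s 0 i ≤ s.length - i := ext_le s 0 i
    rw [hw]
    constructor
    · rw [hz]
      have hv : ((i + ext s 0 i : Nat) : Int) - (i : Int) = ((ext s 0 i : Nat) : Int) := by
        push_cast; ring
      rw [hv]
      exact zpart_set s i h1 h2
    · intro hR'
      refine ⟨h1, by omega, by omega, by omega⟩
  · -- else-branch: i ≤ R, the z-box facts hold
    rw [if_neg hRi]
    have hiR : i ≤ R := by omega
    obtain ⟨hL1, hLi, hRm, hbx⟩ := hbox hiR
    have hjlt : i - L < i := by omega
    have hj1 : 1 ≤ i - L := by omega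
    have hjm : i - L < s.length := by omega
    have hzj : z.getD (i - L) 0 = (ext s 0 (i - L) : Int) := by
      rw [hz, zpart_getD s i (i - L) hjm]
      simp [hj1, hjlt]
    -- the z-box: positions t ≤ R - L of s match s[L+t]
    have boxm : ∀ t ≤ R - L, s.getD t ' ' = s.getD (L + t) ' ' := by
      intro t htR
      have := ext_matches s 0 L t (by omega)
      simpa using this.2
    set j := i - L with hjdef
    by_cases hc : z.getD j 0 < (R : Int) - (i : Int) + 1
    · rw [if_pos hc]
      simp only [InvA]
      rw [hzj] at hc
      have hk : ext s 0 j ≤ R - i := by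
        have : (ext s 0 j : Int) < (R : Int) - (i : Int) + 1 := hc
        omega
      set k := ext s 0 j with hkdef
      -- matches for t < k
      have hmatch : ∀ t < k, i + t < s.length ∧ s.getD (0 + t) ' ' = s.getD (i + t) ' ' := by
        intro t ht
        have hm1 := ext_matches s 0 j t (by omega)
        have hbm : s.getD (j + t) ' ' = s.getD (i + t) ' ' := by
          have := boxm (j + t) (by omega)
          rw [this]
          congr 1
          omega
        refine ⟨by omega, ?_⟩
        rw [hm1.2, hbm]
      -- mismatch at k
      have hstop : ¬ (i + k < s.length ∧ s.getD (0 + k) ' ' = s.getD (i + k) ' ') := by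
        have hst := ext_stop s 0 j
        rw [← hkdef] at hst
        have hjk : j + k < s.length := by omega
        have hne : s.getD (0 + k) ' ' ≠ s.getD (j + k) ' ' := by
          intro hcontra
          exact hst ⟨hjk, hcontra⟩
        have hbm : s.getD (j + k) ' ' = s.getD (i + k) ' ' := by
          have := boxm (j + k) (by omega)
          rw [this]
          congr 1
          omega
        intro hcontra
        exact hne (by rw [hcontra.2, ← hbm])
      have hexti : ext s 0 i = k := ext_eq_of s 0 i k hmatch hstop
      constructor
      · rw [hzj, hz, ← hexti]
        exact zpart_set s i h1 h2
      · intro hR'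
        exact ⟨hL1, by omega, hRm, hbx⟩
    · rw [if_neg hc]
      simp only [InvA]
      rw [hzj] at hc
      have hk : R - i + 1 ≤ ext s 0 j := by
        have : ¬ ((ext s 0 j : Int) < (R : Int) - (i : Int) + 1) := hc
        omega
      -- matched prefix up to R - i
      have hmatch : ∀ t < R - i, i + t < s.length ∧ s.getD (0 + t) ' ' = s.getD (i + t) ' ' := by
        intro t ht
        have hm1 := ext_matches s 0 j t (by omega)
        have hbm : s.getD (j + t) ' ' = s.getD (i + t) ' ' := by
          have := boxm (j + t) (by omega)
          rw [this]
          congr 1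
          omega
        refine ⟨by omega, ?_⟩
        rw [hm1.2, hbm]
      have hw : zwhileA s i R = R + ext s (R - i) R := zwhileA_eq s i R hiR
      have hsplit : ext s 0 i = (R - i) + ext s (0 + (R - i)) (i + (R - i)) :=
        ext_add s (R - i) 0 i hmatch
      have hii : i + (R - i) = R := by omega
      rw [hii] at hsplit
      simp only [Nat.zero_add] at hsplit
      have hRi' : zwhileA s i R = i + ext s 0 i := by
        rw [hw]
        omega
      have hle : ext s 0 i ≤ s.length - i := ext_le s 0 i
      rw [hRi']
      constructor
      · rw [hz]
        have hv : ((i + ext s 0 i : Nat) : Int) - (i : Int) = ((ext s 0 i : Nat) : Int) := by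
          push_cast; ring
        rw [hv]
        exact zpart_set s i h1 h2
      · intro hR'
        refine ⟨h1, by omega, by omega, by omega⟩

theorem foldA (s : List Char) : ∀ (n i : Nat) (st : List Int × Nat × Nat),
    1 ≤ i → i + n = s.length → InvA s i st →
    InvA s s.length ((List.range' i n).foldl (zstepA s) st) := by
  intro n
  induction n with
  | zero => intro i st h1 h2 h; simpa [← h2] using h
  | succ n ih =>
    intro i st h1 h2 h
    rw [List.range'_succ, List.foldl_cons]
    exact ih (i + 1) _ (by omega) (by omega) (stepA s i st h1 (by omega) h)

theorem zpart_zero_eq (s : List Char) : List.replicate s.length (0 : Int) = zpart s 1 := by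
  apply List.ext_getElem
  · simp [zpart]
  · intro n h1 h2
    simp [zpart]
    omega

theorem zAlgoA_eq (s : List Char) : zAlgoA s = zpart s s.length := by
  unfold zAlgoA
  by_cases hm : s.length = 0
  · have hs : s = [] := List.length_eq_zero_iff.mp hm
    subst hs
    simp [zpart]
  · have hinit : InvA s 1 (List.replicate s.length 0, 0, 0) := by
      refine ⟨zpart_zero_eq s, ?_⟩
      intro h
      dsimp at h
      omega
    exact (foldA s (s.length - 1) 1 _ (by omega) (by omega) hinit).1

-- B's z fold produces the same zpart
theorem zB_eq (s : List Char) :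
    (List.range' 1 (s.length - 1)).foldl
      (fun z i => z.set i ((bwhileB s i 0 : Int))) (List.replicate s.length (0 : Int)) =
    zpart s s.length := by
  have key : ∀ (n i : Nat), 1 ≤ i → i + n = s.length →
      (List.range' i n).foldl (fun z i => z.set i ((bwhileB s i 0 : Int))) (zpart s i) =
      zpart s s.length := by
    intro n
    induction n with
    | zero => intro i h1 h2; simp [← h2]
    | succ n ih =>
      intro i h1 h2
      rw [List.range'_succ, List.foldl_cons]
      have hb : (bwhileB s i 0 : Int) = ((ext s 0 i : Nat) : Int) := by
        have h := bwhileB_eq s i 0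
        simp only [Nat.zero_add, Nat.add_zero] at h
        rw [h]
      rw [hb, zpart_set s i h1 (by omega)]
      exact ih (i + 1) (by omega) (by omega)
  by_cases hm : s.length = 0
  · have hs : s = [] := List.length_eq_zero_iff.mp hm
    subst hs
    simp [zpart]
  · rw [zpart_zero_eq s]
    exact key (s.length - 1) 1 (by omega) (by omega)

theorem good_prefix_eq (string : String) : good_prefix string = good_prefix_alt string := by
  unfold good_prefix good_prefix_alt
  simp only [zAlgoA_eq, zB_eq]
  simp only [List.length_reverse]
  set s := string.toList.reverse with hs
  set m := string.toList.length with hmdef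
  set Z := zpart s m with hZ
  have hZlen : Z.length = m := by rw [hZ, zpart_length, hs, List.length_reverse]
  clear_value s m Z
  -- rewrite B's reverse-range fold as a fold over List.range (m-1)
  have hrev : (List.range' 1 (m - 1)).reverse =
      (List.range (m - 1)).map (fun i => m - 1 - i) := by
    rw [List.reverse_range']
    apply List.map_congr_left
    intro i hi
    rw [List.mem_range] at hi
    omega
  rw [hrev, List.foldl_map]
  apply PySem.List.foldl_congr_mem
  intro g i hi
  rw [List.mem_range] at hi
  have hiZ : i < Z.length := by omega
  have hZr : Z.reverse.getD i 0 = Z.getD (m - 1 - i) 0 := by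
    rw [List.getD_eq_getElem?_getD, List.getD_eq_getElem?_getD]
    rw [List.getElem?_reverse hiZ]
    congr 2
    omega
  rw [hZr]
  congr 1
  have hc : ((m - 1 - i : Nat) : Int) = (m : Int) - 1 - (i : Int) := by omega
  rw [hc]
  ring

-- ===== VERDICT (by name: the statement is the Claim_ definition above) =====
theorem good_prefix_spec : Claim_equal_good_prefix := by
  intro string _
  unfold Spec_good_prefix
  exact good_prefix_eq string
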